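-- pv_equiv track=rewrite | github.com/pilartomas/trezor-password-manager-cli | src/trezorpass/utils.py | prepare_graphics
-- ===== SOURCE A (Python) =====
-- def prepare_graphics(graphics: str,
--                      graphics_characters: str = "#",
--                      graphics_class: str = "graphics",
--                      text_class: str = "text"):
--     """Prepares ASCII graphics to be printed by color_print
--
--     Args:
--         graphics: ASCII graphics
--         graphics_characters: String of characters that are considered to be visual only
--         graphics_class: Class to be used for visual characters
--         text_class: Class to be used for non-visual characters
--     """
--     result = []
--     buffer = ""
--     is_graphics = True
--     for c in graphics:
--         if c.isspace():
--             buffer += c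
--         elif is_graphics and c not in graphics_characters:
--             result.append((f"class:{graphics_class}", buffer))
--             is_graphics = False
--             buffer = c
--         elif not is_graphics and c in graphics_characters:
--             result.append((f"class:{text_class}", buffer))
--             is_graphics = True
--             buffer = c
--         else:
--             buffer += c
--     result.append((f"class:{graphics_class if is_graphics else text_class}", buffer))
--     return result
-- ===== SOURCE B (Python) =====
-- def prepare_graphics(graphics: str,
--                      graphics_characters: str = "#",
--                      graphics_class: str = "graphics",
--                      text_class: str = "text"):
--     """Two-pointer span scan: each outer step slices the longest run that keeps
--     the current mode (whitespace always extends the run), alternating modes."""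
--     labels = (f"class:{graphics_class}", f"class:{text_class}")
--     segs = []
--     n = len(graphics)
--     i = 0
--     mode = True
--     while True:
--         j = i
--         while j < n and (graphics[j].isspace() or (graphics[j] in graphics_characters) == mode):
--             j += 1
--         segs.append((labels[0] if mode else labels[1], graphics[i:j]))
--         if j >= n:
--             return segs
--         mode = not mode
--         i = j
-- ===== Notes on version B (the rewrite author's own statement) =====
-- stated objective: alternative
-- what changed: Replaces A's per-character accumulator loop (buffer string + mode flag, flushed at each mode flip) with a two-pointer span scan: each outer step takes the longest run compatible with the current mode, slices it out, and flips the mode.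
import Mathlib
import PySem

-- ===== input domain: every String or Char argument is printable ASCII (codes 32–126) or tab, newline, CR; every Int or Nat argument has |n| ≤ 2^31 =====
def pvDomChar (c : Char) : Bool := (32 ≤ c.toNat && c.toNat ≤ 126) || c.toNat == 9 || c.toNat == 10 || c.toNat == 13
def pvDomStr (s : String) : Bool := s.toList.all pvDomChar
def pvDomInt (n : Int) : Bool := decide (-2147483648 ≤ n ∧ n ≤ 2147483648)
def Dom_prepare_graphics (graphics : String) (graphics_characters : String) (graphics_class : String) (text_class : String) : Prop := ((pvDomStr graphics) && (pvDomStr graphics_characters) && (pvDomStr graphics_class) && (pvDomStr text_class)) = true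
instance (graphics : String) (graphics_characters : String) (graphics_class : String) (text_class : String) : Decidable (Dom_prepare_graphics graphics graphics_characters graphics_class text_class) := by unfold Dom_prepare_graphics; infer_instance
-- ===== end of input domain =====

-- B replaces A's per-character buffer/flag accumulator with a two-pointer span scan
-- (takeWhile/dropWhile runs with alternating modes); objective: alternative decomposition, same cost.

-- ===== PORT A =====
-- label "class:<cls>" for the current mode
def pvLabel (gcl tcl : String) (m : Bool) : String := "class:" ++ (if m then gcl else tcl)

-- A's for-loop: state = (result, buffer, is_graphics), one step per character
def pvLoopA (gc : List Char) (gcl tcl : String) (res : List (String × String))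
    (buf : List Char) (m : Bool) : List Char → List (String × String)
  | [] => res ++ [(pvLabel gcl tcl m, String.ofList buf)]
  | c :: t =>
    if PySem.Chars.isspace c then
      pvLoopA gc gcl tcl res (buf ++ [c]) m t
    else if m && !(gc.contains c) then
      pvLoopA gc gcl tcl (res ++ [(pvLabel gcl tcl true, String.ofList buf)]) [c] false t
    else if !m && gc.contains c then
      pvLoopA gc gcl tcl (res ++ [(pvLabel gcl tcl false, String.ofList buf)]) [c] true t
    else
      pvLoopA gc gcl tcl res (buf ++ [c]) m t

def prepare_graphics (graphics : String) (graphics_characters : String) (graphics_class : String) (text_class : String) : List (String × String) :=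
  pvLoopA graphics_characters.toList graphics_class text_class [] [] true graphics.toList

-- ===== PORT B =====
-- B's labels pair: ("class:"+graphics_class, "class:"+text_class), selected by mode
def pvLabelB (gcl tcl : String) (m : Bool) : String := "class:" ++ (if m then gcl else tcl)

-- a character extends the current run iff it is whitespace or its membership matches the mode
def pvP (gc : List Char) (m : Bool) (c : Char) : Bool :=
  PySem.Chars.isspace c || (gc.contains c == m)

-- B's outer while loop: slice the longest run for the current mode, flip, repeat
def pvGo (gc : List Char) (gcl tcl : String) (m : Bool) (l : List Char) : List (String × String) :=
  match h : l.dropWhile (pvP gc m) with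
  | [] => [(pvLabelB gcl tcl m, String.ofList (l.takeWhile (pvP gc m)))]
  | c :: t => (pvLabelB gcl tcl m, String.ofList (l.takeWhile (pvP gc m))) :: pvGo gc gcl tcl (!m) (c :: t)
termination_by (2 * l.length + (match l with | [] => 0 | c :: _ => if pvP gc m c then 0 else 1) : Nat)
decreasing_by
  · have hle : (l.dropWhile (pvP gc m)).length ≤ l.length := (List.dropWhile_sublist _).length_le
    rw [h] at hle
    have hc : pvP gc m c = false := by
      have := List.head?_dropWhile_not (pvP gc m) l
      rw [h] at this; simpa using this
    have hc' : pvP gc (!m) c = true := by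
      cases m <;> simp_all [pvP]
    cases l with
    | nil => simp at h
    | cons a t' =>
      by_cases ha : pvP gc m a = true
      · have : (a :: t').dropWhile (pvP gc m) = t'.dropWhile (pvP gc m) := by
          simp [ha]
        rw [this] at h
        have : (t'.dropWhile (pvP gc m)).length ≤ t'.length := (List.dropWhile_sublist _).length_le
        rw [h] at this
        simp only [List.length_cons] at this ⊢
        simp [hc', ha]
        omega
      · simp [ha] at h
        obtain ⟨h1, h2⟩ := h
        subst h1; subst h2
        simp [hc', ha]

def prepare_graphics_alt (graphics : String) (graphics_characters : String) (graphics_class : String) (text_class : String) : List (String × String) :=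
  pvGo graphics_characters.toList graphics_class text_class true graphics.toList

-- ===== PRECONDITION & SPEC =====
def Spec_prepare_graphics (graphics : String) (graphics_characters : String) (graphics_class : String) (text_class : String) (out : List (String × String)) : Prop := out = prepare_graphics_alt graphics graphics_characters graphics_class text_class
instance (graphics : String) (graphics_characters : String) (graphics_class : String) (text_class : String) (out : List (String × String)) : Decidable (Spec_prepare_graphics graphics graphics_characters graphics_class text_class out) := by unfold Spec_prepare_graphics; infer_instance

-- ===== CLAIM (what is proved, stated in full; the proofs are below) =====
def Claim_equal_prepare_graphics : Prop := ∀ (graphics : String) (graphics_characters : String) (graphics_class : String) (text_class : String), Dom_prepare_graphics graphics graphics_characters graphics_class text_class → Spec_prepare_graphics graphics graphics_characters graphics_class text_class (prepare_graphics graphics graphics_characters graphics_class text_class)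

-- ===== LEMMAS AND PROOFS =====

-- prepend a buffer onto the first segment
def pvConsBuf (buf : List Char) : List (String × String) → List (String × String)
  | [] => []
  | (lab, s) :: rest => (lab, String.ofList buf ++ s) :: rest

theorem pvMk_append (a b : List Char) : String.ofList a ++ String.ofList b = String.ofList (a ++ b) := by
  exact String.ofList_append.symm

theorem pvOfListNil : String.ofList ([] : List Char) = "" := rfl

theorem pvConsBuf_consBuf (a b : List Char) (xs : List (String × String)) :
    pvConsBuf a (pvConsBuf b xs) = pvConsBuf (a ++ b) xs := by
  cases xs with
  | nil => rfl
  | cons p rest =>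
    obtain ⟨lab, s⟩ := p
    simp only [pvConsBuf]
    rw [← String.append_assoc, pvMk_append]

theorem pvConsBuf_nil (xs : List (String × String)) : pvConsBuf [] xs = xs := by
  cases xs with
  | nil => rfl
  | cons p rest =>
    obtain ⟨lab, s⟩ := p
    have : (String.ofList ([] : List Char)) = "" := rfl
    simp [pvConsBuf, this, String.empty_append]

theorem pvGo_cons_of_p (gc : List Char) (gcl tcl : String) (m : Bool) (c : Char) (t : List Char)
    (hc : pvP gc m c = true) :
    pvGo gc gcl tcl m (c :: t) = pvConsBuf [c] (pvGo gc gcl tcl m t) := by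
  have hd : (c :: t).dropWhile (pvP gc m) = t.dropWhile (pvP gc m) := by simp [hc]
  have ht : (c :: t).takeWhile (pvP gc m) = c :: t.takeWhile (pvP gc m) := by simp [hc]
  rw [pvGo.eq_def, pvGo.eq_def]
  split <;> split <;> simp_all [pvConsBuf, pvMk_append]

theorem pvGo_cons_of_not_p (gc : List Char) (gcl tcl : String) (m : Bool) (c : Char) (t : List Char)
    (hc : pvP gc m c = false) :
    pvGo gc gcl tcl m (c :: t) = (pvLabelB gcl tcl m, "") :: pvGo gc gcl tcl (!m) (c :: t) := by
  have hd : (c :: t).dropWhile (pvP gc m) = c :: t := by simp [hc]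
  have ht : (c :: t).takeWhile (pvP gc m) = [] := by simp [hc]
  conv_lhs => rw [pvGo.eq_def]
  split <;> simp_all [ht, pvOfListNil]

theorem pvLabelB_eq (gcl tcl : String) (m : Bool) : pvLabelB gcl tcl m = pvLabel gcl tcl m := rfl

theorem pvLoopA_eq (gc : List Char) (gcl tcl : String) (l : List Char) :
    ∀ (res : List (String × String)) (buf : List Char) (m : Bool),
    pvLoopA gc gcl tcl res buf m l = res ++ pvConsBuf buf (pvGo gc gcl tcl m l) := by
  induction l with
  | nil =>
    intro res buf m
    rw [pvGo.eq_def]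
    simp [pvLoopA, pvLabelB_eq, pvConsBuf, pvMk_append]
  | cons c t ih =>
    intro res buf m
    by_cases hs : PySem.Chars.isspace c = true
    · have hp : pvP gc m c = true := by simp [pvP, hs]
      rw [pvGo_cons_of_p gc gcl tcl m c t hp, pvConsBuf_consBuf]
      simp [pvLoopA, pvLabelB_eq, hs, ih]
    · cases m with
      | true =>
        by_cases hmem : c ∈ gc
        · have hp : pvP gc true c = true := by simp [pvP, hs, hmem]
          rw [pvGo_cons_of_p gc gcl tcl true c t hp, pvConsBuf_consBuf]
          simp [pvLoopA, pvLabelB_eq, hs, hmem, ih]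
        · have hp : pvP gc true c = false := by simp [pvP, hs, hmem]
          have hp' : pvP gc false c = true := by simp [pvP, hmem]
          rw [pvGo_cons_of_not_p gc gcl tcl true c t hp]
          rw [show (!true) = false from rfl]
          rw [pvGo_cons_of_p gc gcl tcl false c t hp']
          simp [pvLoopA, pvLabelB_eq, hs, hmem, ih, pvConsBuf, pvOfListNil]
      | false =>
        by_cases hmem : c ∈ gc
        · have hp : pvP gc false c = false := by simp [pvP, hs, hmem]
          have hp' : pvP gc true c = true := by simp [pvP, hmem]
          rw [pvGo_cons_of_not_p gc gcl tcl false c t hp]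
          rw [show (!false) = true from rfl]
          rw [pvGo_cons_of_p gc gcl tcl true c t hp']
          simp [pvLoopA, pvLabelB_eq, hs, hmem, ih, pvConsBuf, pvOfListNil]
        · have hp : pvP gc false c = true := by simp [pvP, hs, hmem]
          rw [pvGo_cons_of_p gc gcl tcl false c t hp, pvConsBuf_consBuf]
          simp [pvLoopA, pvLabelB_eq, hs, hmem, ih]

theorem prepare_graphics_spec : Claim_equal_prepare_graphics := by
  intro g gc gcl tcl _
  unfold Spec_prepare_graphics prepare_graphics prepare_graphics_alt
  rw [pvLoopA_eq, pvConsBuf_nil]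
  rfl
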